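-- pv_equiv track=rewrite | github.com/s-prechtl/AdventOfCode | 2021/Day8/Day8_2_Reddit.py | shares_only_one_segment
-- ===== SOURCE A (Python) =====
-- def shares_only_one_segment(segment, candidate):
--     total = 0
--     for a in segment:
--         for b in candidate:
--             if (a == b):
--                 total += 1
--                 shared = a
--     return shared if total == 1 else None
-- ===== SOURCE B (Python) =====
-- def shares_only_one_segment(segment, candidate):
--     common = set(segment) & set(candidate)
--     if len(common) == 1:
--         [c] = common
--         if segment.count(c) == 1 and candidate.count(c) == 1:
--             return c
--     return None
-- ===== Notes on version B (the rewrite author's own statement) =====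
-- stated objective: faster
-- what changed: Replaces the nested O(n*m) pair-counting loop (with running total and last-shared accumulator) by computing the set intersection of the two strings and returning its sole element iff the intersection is a singleton whose character occurs exactly once in each string.
import Mathlib
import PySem

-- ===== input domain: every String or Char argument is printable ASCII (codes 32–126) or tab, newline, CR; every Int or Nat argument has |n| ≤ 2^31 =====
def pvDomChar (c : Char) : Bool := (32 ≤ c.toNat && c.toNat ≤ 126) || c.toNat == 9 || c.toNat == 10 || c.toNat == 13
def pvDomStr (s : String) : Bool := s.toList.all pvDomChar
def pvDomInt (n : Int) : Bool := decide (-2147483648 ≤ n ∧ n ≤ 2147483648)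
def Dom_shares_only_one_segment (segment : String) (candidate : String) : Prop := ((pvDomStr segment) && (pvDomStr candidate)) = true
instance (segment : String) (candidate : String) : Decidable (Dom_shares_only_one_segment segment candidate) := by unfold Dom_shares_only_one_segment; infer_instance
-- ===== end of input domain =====

-- B replaces A's nested pair-counting scan by a set intersection plus two count checks (alternative; no pair total accumulated).


-- ===== PORT A =====
def shares_only_one_segment (segment : String) (candidate : String) : Option String :=
  let st : Int × Option Char := segment.toList.foldl (fun st a =>
    candidate.toList.foldl (fun st b =>
      if a == b then (st.1 + 1, some a) else st) st) (0, none)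
  if st.1 = 1 then st.2.map (fun c => String.ofList [c]) else none

-- ===== PORT B =====
-- '[c] = common' unpacks the singleton set: order-independent, ported as the match on the one-element list.
def shares_only_one_segment_alt (segment : String) (candidate : String) : Option String :=
  let common : PySem.Set Char :=
    PySem.Set.inter (PySem.Set.ofList segment.toList) (PySem.Set.ofList candidate.toList)
  match common with
  | [c] =>
    if segment.toList.count c = 1 ∧ candidate.toList.count c = 1
    then some (String.ofList [c]) else none
  | _ => none

-- ===== PRECONDITION & SPEC =====
def Spec_shares_only_one_segment (segment : String) (candidate : String) (out : Option String) : Prop := out = shares_only_one_segment_alt segment candidate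
instance (segment : String) (candidate : String) (out : Option String) : Decidable (Spec_shares_only_one_segment segment candidate out) := by unfold Spec_shares_only_one_segment; infer_instance

-- ===== CLAIM (what is proved, stated in full; the proofs are below) =====
def Claim_equal_shares_only_one_segment : Prop := ∀ (segment : String) (candidate : String), Dom_shares_only_one_segment segment candidate → Spec_shares_only_one_segment segment candidate (shares_only_one_segment segment candidate)

-- ===== LEMMAS AND PROOFS =====

-- A's inner loop over candidate adds count(candidate, a) to total and sets shared = a iff there was a match
lemma inner_loop (a : Char) (l : List Char) (st : Int × Option Char) :
    l.foldl (fun st b => if a == b then (st.1 + 1, some a) else st) st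
    = if (l.count a : Int) ≠ 0 then (st.1 + (l.count a : Int), some a) else st := by
  induction l generalizing st with
  | nil => simp
  | cons x xs ih =>
    rw [List.foldl_cons, List.count_cons]
    by_cases h : a = x
    · subst h
      rw [if_pos (beq_self_eq_true a ▸ rfl)]
      rw [ih]
      split_ifs with h1 h2 <;> simp_all [Prod.ext_iff] <;> omega
    · have hb : (a == x) = false := by simp [h]
      have hx : ¬ x = a := fun he => h he.symm
      rw [if_neg (by simp [hb])]
      rw [ih]
      simp [hx]

-- sum of candidate-counts over a list, and last matching char
def pvS (cand : List Char) (l : List Char) : Nat := (l.map (fun a => cand.count a)).sum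
def pvLast (cand : List Char) (l : List Char) (sh : Option Char) : Option Char :=
  l.foldl (fun sh a => if cand.count a ≠ 0 then some a else sh) sh

lemma outer_loop (cand : List Char) (l : List Char) (st : Int × Option Char) :
    l.foldl (fun st a =>
      cand.foldl (fun st b => if a == b then (st.1 + 1, some a) else st) st) st
    = (st.1 + (pvS cand l : Int), pvLast cand l st.2) := by
  induction l generalizing st with
  | nil => simp [pvS, pvLast]
  | cons x xs ih =>
    rw [List.foldl_cons, inner_loop, ih]
    by_cases h : (cand.count x : Int) ≠ 0
    · rw [if_pos h]
      have hn : cand.count x ≠ 0 := by omega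
      simp only [pvS, pvLast, List.map_cons, List.sum_cons, List.foldl_cons, if_pos hn]
      rw [Prod.mk.injEq]
      exact ⟨by push_cast; ring, rfl⟩
    · rw [if_neg h]
      have hz : cand.count x = 0 := by omega
      simp [pvS, pvLast, hz]

-- a Nat-sum over a map is zero iff each value is
lemma sum_map_zero (f : Char → Nat) (l : List Char) :
    (l.map f).sum = 0 ↔ ∀ a ∈ l, f a = 0 := by
  induction l with
  | nil => simp
  | cons x xs ih => simp [ih, Nat.add_eq_zero_iff]

-- a Nat-sum over a map equal to 1 isolates a unique contributing position
lemma sum_map_one (f : Char → Nat) (l : List Char) (h : (l.map f).sum = 1) :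
    ∃ c l1 l2, l = l1 ++ c :: l2 ∧ f c = 1 ∧ (∀ a ∈ l1, f a = 0) ∧ (∀ a ∈ l2, f a = 0) := by
  induction l with
  | nil => simp at h
  | cons x xs ih =>
    simp at h
    rcases Nat.add_eq_one_iff.mp h with ⟨hx, hs⟩ | ⟨hx, hs⟩
    · rcases ih hs with ⟨c, l1, l2, he, h1, h2, h3⟩
      exact ⟨c, x :: l1, l2, by simp [he], h1, by simpa [hx] using h2, h3⟩
    · exact ⟨x, [], xs, rfl, hx, by simp, (sum_map_zero f xs).mp hs⟩

lemma pvLast_of_zero (cand l : List Char) (sh : Option Char)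
    (h : ∀ a ∈ l, cand.count a = 0) : pvLast cand l sh = sh := by
  induction l generalizing sh with
  | nil => rfl
  | cons x xs ih =>
    have hx := h x (by simp)
    simp only [pvLast, List.foldl_cons, hx]
    simp only [ne_eq, not_true_eq_false, if_false]
    exact ih sh (fun a ha => h a (by simp [ha]))

lemma nodup_singleton_of_mem (l : List Char) (c : Char) (hn : l.Nodup)
    (hm : ∀ a, a ∈ l ↔ a = c) : l = [c] := by
  cases l with
  | nil => exact absurd ((hm c).mpr rfl) (by simp)
  | cons x t =>
    have hx : x = c := (hm x).mp (by simp)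
    subst hx
    cases t with
    | nil => rfl
    | cons y u =>
      have hy : y = x := (hm y).mp (by simp)
      simp [hy] at hn

lemma sum_eq_count_mul (cand l : List Char) (c : Char)
    (h : ∀ a ∈ l, cand.count a ≠ 0 → a = c) :
    (l.map (fun a => cand.count a)).sum = l.count c * cand.count c := by
  induction l with
  | nil => simp
  | cons x xs ih =>
    have ih' := ih (fun a ha => h a (by simp [ha]))
    by_cases hx : x = c
    · subst hx
      simp [ih', Nat.add_mul]
      ring
    · have hz : cand.count x = 0 := by
        by_contra hnz
        exact hx (h x (by simp) hnz)
      simp [hz, ih', hx]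

theorem shares_only_one_segment_spec : Claim_equal_shares_only_one_segment := by
  intro segment candidate _
  show shares_only_one_segment segment candidate = shares_only_one_segment_alt segment candidate
  unfold shares_only_one_segment shares_only_one_segment_alt
  rw [outer_loop]
  simp only [zero_add]
  have hmem : ∀ a, a ∈ PySem.Set.inter (PySem.Set.ofList segment.toList)
      (PySem.Set.ofList candidate.toList) ↔ a ∈ segment.toList ∧ a ∈ candidate.toList := by
    intro a
    rw [PySem.Set.mem_inter, PySem.Set.mem_ofList, PySem.Set.mem_ofList]
  have hnd : (PySem.Set.inter (PySem.Set.ofList segment.toList)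
      (PySem.Set.ofList candidate.toList)).Nodup :=
    PySem.Set.nodup_inter _ _ (PySem.Set.nodup_ofList _)
  by_cases hS : (pvS candidate.toList segment.toList : Int) = 1
  · -- exactly one shared pair
    have hS1 : pvS candidate.toList segment.toList = 1 := by exact_mod_cast hS
    rcases sum_map_one _ _ hS1 with ⟨c, l1, l2, he, hc1, hz1, hz2⟩
    have hccand : c ∈ candidate.toList := by
      rw [← List.count_pos_iff]; omega
    have hcseg : c ∈ segment.toList := by rw [he]; simp
    -- the last shared char is c
    have hlast : pvLast candidate.toList segment.toList none = some c := by
      rw [he]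
      show List.foldl _ none (l1 ++ c :: l2) = some c
      rw [List.foldl_append]
      have h1 : List.foldl (fun sh a => if candidate.toList.count a ≠ 0 then some a else sh)
          none l1 = none := pvLast_of_zero _ _ _ hz1
      rw [h1, List.foldl_cons]
      simp only [hc1, ne_eq, Nat.one_ne_zero, not_false_eq_true, if_true]
      exact pvLast_of_zero _ _ _ hz2
    -- the intersection is exactly [c]
    have hcom : PySem.Set.inter (PySem.Set.ofList segment.toList)
        (PySem.Set.ofList candidate.toList) = [c] := by
      apply nodup_singleton_of_mem _ _ hnd
      intro a
      rw [hmem]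
      constructor
      · rintro ⟨has, hac⟩
        have hnz : candidate.toList.count a ≠ 0 := by
          rw [ne_eq, List.count_eq_zero]; exact fun hn => hn hac
        rw [he] at has
        rcases List.mem_append.mp has with h1 | h1
        · exact absurd (hz1 a h1) hnz
        · rcases List.mem_cons.mp h1 with h2 | h2
          · exact h2
          · exact absurd (hz2 a h2) hnz
      · rintro rfl; exact ⟨hcseg, hccand⟩
    have hsegc : segment.toList.count c = 1 := by
      have hc1' : c ∉ l1 := fun hin => by have := hz1 c hin; omega
      have hc2' : c ∉ l2 := fun hin => by have := hz2 c hin; omega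
      rw [he, List.count_append, List.count_cons]
      rw [List.count_eq_zero.mpr hc1', List.count_eq_zero.mpr hc2']
      simp
    rw [hcom, if_pos hS]
    simp [hlast, hsegc, hc1]
  · -- no unique shared pair: both sides are none
    rw [if_neg hS]
    rcases hcase : PySem.Set.inter (PySem.Set.ofList segment.toList)
        (PySem.Set.ofList candidate.toList) with _ | ⟨c, _ | ⟨d, t⟩⟩
    · rfl
    · -- singleton intersection: the count check must fail
      show none = if segment.toList.count c = 1 ∧ candidate.toList.count c = 1
          then some (String.ofList [c]) else none
      rw [if_neg]
      rintro ⟨hs1, hc1⟩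
      apply hS
      have honly : ∀ a ∈ segment.toList, candidate.toList.count a ≠ 0 → a = c := by
        intro a ha hnz
        have hac : a ∈ candidate.toList := by
          rw [← List.count_pos_iff]; omega
        have : a ∈ [c] := by rw [← hcase, hmem]; exact ⟨ha, hac⟩
        simpa using this
      have := sum_eq_count_mul candidate.toList segment.toList c honly
      unfold pvS
      rw [this, hs1, hc1]
      norm_num
    · rfl
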